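-- pv_equiv track=rewrite | github.com/htfpop/AES-128-ECB | src/AESEncrypt.py | mix_columns_transform
-- ===== SOURCE A (Python) =====
-- mix_col_matrix = [ [0x02, 0x03, 0x01, 0x01],
--                    [0x01, 0x02, 0x03, 0x01],
--                    [0x01, 0x01, 0x02, 0x03],
--                    [0x03, 0x01, 0x01, 0x02] ]
--
-- def mix_columns_transform(I_row, S_Col):
--     temp = 0x00
--
--     for i in range(len(mix_col_matrix[I_row])):
--         element = mix_col_matrix[I_row][i]
--
--         if element == 0x02:
--             temp ^= (S_Col[i] << 1)
--             if S_Col[i] >= 0x80: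
--                 temp ^= 0x1B
--
--         elif element == 0x03:
--             temp ^= S_Col[i] ^ (S_Col[i] << 1)
--
--             if S_Col[i] >= 0x80:
--                 temp ^= 0x1B
--
--         else:
--             temp ^= S_Col[i]
--
--     return temp & 0xFF
-- ===== SOURCE B (Python) =====
-- mix_col_matrix = [ [0x02, 0x03, 0x01, 0x01],
--                    [0x01, 0x02, 0x03, 0x01],
--                    [0x01, 0x01, 0x02, 0x03],
--                    [0x03, 0x01, 0x01, 0x02] ]
--
-- def gf_mul(a, b):
--     acc = 0
--     for _ in range(8):
--         if a & 1:
--             acc ^= b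
--         a >>= 1
--         carry = b >= 0x80
--         b <<= 1
--         if carry:
--             b ^= 0x1B
--     return acc
--
-- def mix_columns_transform(I_row, S_Col):
--     row = mix_col_matrix[I_row]
--     res = 0
--     for i in range(4):
--         res ^= gf_mul(row[i], S_Col[i])
--     return res & 0xFF
-- ===== Notes on version B (the rewrite author's own statement) =====
-- stated objective: alternative
-- what changed: Replaces A's per-value 0x01/0x02/0x03 branch dispatch with a single uniform GF(2^8) bit-loop multiplication gf_mul(a,b) XOR-folded over the matrix row.
import Mathlib
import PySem

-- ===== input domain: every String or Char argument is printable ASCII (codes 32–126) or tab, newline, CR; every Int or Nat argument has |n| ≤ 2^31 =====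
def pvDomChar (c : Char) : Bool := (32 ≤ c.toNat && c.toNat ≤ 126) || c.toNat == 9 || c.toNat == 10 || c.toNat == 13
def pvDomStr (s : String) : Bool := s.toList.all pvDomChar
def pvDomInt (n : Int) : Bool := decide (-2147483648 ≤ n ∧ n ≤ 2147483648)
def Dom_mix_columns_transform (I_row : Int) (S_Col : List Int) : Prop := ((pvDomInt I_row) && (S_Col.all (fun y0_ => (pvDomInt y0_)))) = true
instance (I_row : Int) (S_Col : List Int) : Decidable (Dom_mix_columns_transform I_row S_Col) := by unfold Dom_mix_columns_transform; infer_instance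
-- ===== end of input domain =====

-- B replaces A's per-value 0x01/0x02/0x03 branch dispatch by one uniform GF(2^8) bit-loop
-- multiply gf_mul and XOR-folds it over the matrix row (objective: alternative, same cost).

-- ===== PORT A =====
def mix_col_matrix : List (List Int) :=
  [[2, 3, 1, 1], [1, 2, 3, 1], [1, 1, 2, 3], [3, 1, 1, 2]]

def mix_columns_transform (I_row : Int) (S_Col : List Int) : Int :=
  let row := PySem.List.pyGetD mix_col_matrix I_row []
  let temp := (PySem.List.pyRange 0 (row.length : Int) 1).foldl (fun temp i =>
    let element := PySem.List.pyGetD row i 0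
    let s := PySem.List.pyGetD S_Col i 0
    if element = 2 then
      let t := PySem.Int.bxor temp (s <<< (1 : Nat))
      if 128 ≤ s then PySem.Int.bxor t 27 else t
    else if element = 3 then
      let t := PySem.Int.bxor temp (PySem.Int.bxor s (s <<< (1 : Nat)))
      if 128 ≤ s then PySem.Int.bxor t 27 else t
    else
      PySem.Int.bxor temp s) 0
  PySem.Int.band temp 255

-- ===== PORT B =====
-- one iteration of gf_mul's 8-round bit loop over the state (a, b, acc)
def gf_step (st : Int × Int × Int) (_ : Int) : Int × Int × Int :=
  let a := st.1
  let b := st.2.1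
  let acc := st.2.2
  let acc := if PySem.Int.band a 1 ≠ 0 then PySem.Int.bxor acc b else acc
  let a := a >>> (1 : Nat)
  let carry := 128 ≤ b
  let b := b <<< (1 : Nat)
  let b := if carry then PySem.Int.bxor b 27 else b
  (a, b, acc)

def gf_mul (a b : Int) : Int :=
  ((PySem.List.pyRange 0 8 1).foldl gf_step (a, b, 0)).2.2

def mix_columns_transform_alt (I_row : Int) (S_Col : List Int) : Int :=
  let row := PySem.List.pyGetD mix_col_matrix I_row []
  let res := (PySem.List.pyRange 0 4 1).foldl (fun res i =>
    PySem.Int.bxor res (gf_mul (PySem.List.pyGetD row i 0) (PySem.List.pyGetD S_Col i 0))) 0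
  PySem.Int.band res 255

-- ===== PRECONDITION & SPEC =====
-- A raises IndexError outside these bounds (row index out of range, or S_Col shorter than 4)
def Pre_mix_columns_transform (I_row : Int) (S_Col : List Int) : Prop :=
  (-4 ≤ I_row ∧ I_row < 4) ∧ 4 ≤ S_Col.length
instance (I_row : Int) (S_Col : List Int) : Decidable (Pre_mix_columns_transform I_row S_Col) := by unfold Pre_mix_columns_transform; infer_instance
def pvWitness_mix_columns_transform : Int × List Int := (1, [211, 17, 128, 5])

def Spec_mix_columns_transform (I_row : Int) (S_Col : List Int) (out : Int) : Prop := out = mix_columns_transform_alt I_row S_Col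
instance (I_row : Int) (S_Col : List Int) (out : Int) : Decidable (Spec_mix_columns_transform I_row S_Col out) := by unfold Spec_mix_columns_transform; infer_instance

-- ===== CLAIM (what is proved, stated in full; the proofs are below) =====
def Claim_equal_mix_columns_transform : Prop := ∀ (I_row : Int) (S_Col : List Int), Dom_mix_columns_transform I_row S_Col → Pre_mix_columns_transform I_row S_Col → Spec_mix_columns_transform I_row S_Col (mix_columns_transform I_row S_Col)

-- ===== LEMMAS AND PROOFS =====

theorem bxor_eq_xor (a b : Int) : PySem.Int.bxor a b = a.xor b := by
  unfold PySem.Int.bxor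
  cases a <;> cases b <;> simp [Int.xor] <;> omega

theorem xor_assoc' (a b c : Int) : (a.xor b).xor c = a.xor (b.xor c) := by
  cases a <;> cases b <;> cases c <;> simp [Int.xor, Nat.xor_assoc]

theorem xor_comm' (a b : Int) : a.xor b = b.xor a := by
  cases a <;> cases b <;> simp [Int.xor, Nat.xor_comm]

theorem xor_left_comm' (a b c : Int) : a.xor (b.xor c) = b.xor (a.xor c) := by
  rw [← xor_assoc', xor_comm' a b, xor_assoc']

theorem xor_zero' (a : Int) : Int.xor 0 a = a := by
  cases a <;> simp [Int.xor]

-- the b-update of one gf_mul round (xtime)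
def bshift (b : Int) : Int :=
  if 128 ≤ b then PySem.Int.bxor (b <<< (1 : Nat)) 27 else b <<< (1 : Nat)

theorem gf_step_0 (b acc x : Int) : gf_step (0, b, acc) x = (0, bshift b, acc) := by
  simp [gf_step, bshift, (by decide : PySem.Int.band (0:Int) 1 = 0),
    (by decide : (0:Int) >>> (1:Nat) = 0)]

theorem gf_step_1 (b acc x : Int) : gf_step (1, b, acc) x = (0, bshift b, PySem.Int.bxor acc b) := by
  simp [gf_step, bshift, (by decide : (1:Int) >>> (1:Nat) = 0)]

theorem gf_step_2 (b acc x : Int) : gf_step (2, b, acc) x = (1, bshift b, acc) := by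
  simp [gf_step, bshift, (by decide : PySem.Int.band (2:Int) 1 = 0),
    (by decide : (2:Int) >>> (1:Nat) = 1)]

theorem gf_step_3 (b acc x : Int) : gf_step (3, b, acc) x = (1, bshift b, PySem.Int.bxor acc b) := by
  simp [gf_step, bshift, (by decide : PySem.Int.band (3:Int) 1 = 1),
    (by decide : (3:Int) >>> (1:Nat) = 1)]

theorem pyRange8 : PySem.List.pyRange 0 8 1 = [0, 1, 2, 3, 4, 5, 6, 7] := by decide

theorem gf_mul_one (b : Int) : gf_mul 1 b = b := by
  simp only [gf_mul, pyRange8, List.foldl_cons, List.foldl_nil, gf_step_0, gf_step_1]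
  simp [bxor_eq_xor, xor_zero']

theorem gf_mul_two (b : Int) : gf_mul 2 b = bshift b := by
  simp only [gf_mul, pyRange8, List.foldl_cons, List.foldl_nil, gf_step_0, gf_step_1, gf_step_2]
  simp [bxor_eq_xor, xor_zero']

theorem gf_mul_three (b : Int) : gf_mul 3 b = PySem.Int.bxor b (bshift b) := by
  simp only [gf_mul, pyRange8, List.foldl_cons, List.foldl_nil, gf_step_0, gf_step_1, gf_step_3]
  simp [bxor_eq_xor, xor_zero']

theorem row_m4 : PySem.List.pyGetD mix_col_matrix (-4) [] = [2, 3, 1, 1] := by decide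
theorem row_m3 : PySem.List.pyGetD mix_col_matrix (-3) [] = [1, 2, 3, 1] := by decide
theorem row_m2 : PySem.List.pyGetD mix_col_matrix (-2) [] = [1, 1, 2, 3] := by decide
theorem row_m1 : PySem.List.pyGetD mix_col_matrix (-1) [] = [3, 1, 1, 2] := by decide
theorem row_0 : PySem.List.pyGetD mix_col_matrix 0 [] = [2, 3, 1, 1] := by decide
theorem row_1 : PySem.List.pyGetD mix_col_matrix 1 [] = [1, 2, 3, 1] := by decide
theorem row_2 : PySem.List.pyGetD mix_col_matrix 2 [] = [1, 1, 2, 3] := by decide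
theorem row_3 : PySem.List.pyGetD mix_col_matrix 3 [] = [3, 1, 1, 2] := by decide

theorem pyRange4 : PySem.List.pyRange 0 4 1 = [0, 1, 2, 3] := by decide

set_option maxHeartbeats 2000000 in
theorem mix_key (I_row : Int) (h1 : -4 ≤ I_row) (h2 : I_row < 4)
    (s0 s1 s2 s3 : Int) (t : List Int) :
    mix_columns_transform I_row (s0 :: s1 :: s2 :: s3 :: t)
      = mix_columns_transform_alt I_row (s0 :: s1 :: s2 :: s3 :: t) := by
  interval_cases I_row <;>
    simp only [mix_columns_transform, mix_columns_transform_alt,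
      row_m4, row_m3, row_m2, row_m1, row_0, row_1, row_2, row_3] <;>
    norm_num [pyRange4, List.foldl_cons, List.foldl_nil, PySem.List.pyGetD_ofNat',
      List.getD_eq_getElem?_getD, gf_mul_one, gf_mul_two, gf_mul_three, bshift] <;>
    split_ifs <;>
    simp [bxor_eq_xor, xor_assoc', xor_comm', xor_left_comm', xor_zero']

-- ===== VERDICT (by name: the statement is the Claim_ definition above) =====
theorem mix_columns_transform_spec : Claim_equal_mix_columns_transform := by
  intro I_row S_Col _ hpre
  obtain ⟨⟨h1, h2⟩, hlen⟩ := hpre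
  match S_Col, hlen with
  | s0 :: s1 :: s2 :: s3 :: t, _ =>
    exact mix_key I_row h1 h2 s0 s1 s2 s3 t
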